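-- pv_equiv track=rewrite | github.com/seongddiyong/Algorithm | 프로그래머스/3/64064. 불량 사용자/불량 사용자.py | solution
-- ===== SOURCE A (Python) =====
-- def solution(user_id, banned_id):
--     res = []
--     for b in banned_id:
--         temp = []
--         for u in user_id:
--             if len(u) == len(b):
--                 for i in range(len(u)):
--                     if u[i] != b[i] and b[i] != '*':
--                         break
--                 else:
--                     temp.append(u)
--         res.append(temp)
--
--     ans = []
--
--     def dfs(answers, lv):
--         if lv == len(banned_id):
--             ans.append(answers)
--             return
--
--         for value in res[lv]:
--             if value not in answers:
--                 answers.append(value)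
--                 dfs(answers[:], lv + 1)
--                 answers.pop()
--
--     dfs([], 0)
--
--     return len(set(''.join(sorted(x)) for x in ans))
-- ===== SOURCE B (Python) =====
-- def solution(user_id, banned_id):
--     res = [[u for u in user_id
--             if len(u) == len(b)
--             and all(bc == '*' or uc == bc for uc, bc in zip(u, b))]
--            for b in banned_id]
--     partial = [[]]
--     for cand in res:
--         partial = [p + [v] for p in partial for v in cand if v not in p]
--     return len({''.join(sorted(p)) for p in partial})
-- ===== Notes on version B (the rewrite author's own statement) =====
-- stated objective: idiomatic
-- what changed: Candidate lists become zip/all comprehensions instead of index loops with for/else-break, and the recursive backtracking DFS with append/pop and an outer accumulator is replaced by an iterative breadth-first fold that extends all partial assignments level by level, deduplicated by a set comprehension.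
import Mathlib
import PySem

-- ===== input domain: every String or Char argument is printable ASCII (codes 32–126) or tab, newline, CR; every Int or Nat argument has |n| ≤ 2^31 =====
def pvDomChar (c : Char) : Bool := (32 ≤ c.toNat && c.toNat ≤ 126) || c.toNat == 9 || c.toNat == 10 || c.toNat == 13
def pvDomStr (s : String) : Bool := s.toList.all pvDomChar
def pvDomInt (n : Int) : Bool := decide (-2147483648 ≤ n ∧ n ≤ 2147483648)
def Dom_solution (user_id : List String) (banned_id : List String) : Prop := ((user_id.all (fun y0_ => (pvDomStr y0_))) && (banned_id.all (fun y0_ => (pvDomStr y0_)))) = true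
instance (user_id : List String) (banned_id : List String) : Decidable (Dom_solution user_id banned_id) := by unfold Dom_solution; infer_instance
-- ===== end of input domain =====

-- B replaces A's index loops by zip/all comprehensions and the recursive append/pop DFS by an
-- iterative level-by-level fold over partial assignments (idiomatic; same asymptotic cost).

-- ===== PORT A =====
-- A's inner 'for i in range(len(u)): if u[i] != b[i] and b[i] != '*': break / else:' —
-- lengths are equal at the call site, so the index loop is the obvious paired structural recursion.
def aMatchLoop : List Char → List Char → Bool
  | [], _ => true
  | _ :: _, [] => true
  | c :: u', d :: b' => if c ≠ d ∧ d ≠ '*' then false else aMatchLoop u' b'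

def aDfs : List (List String) → List String → List (List String)
  | [], answers => [answers]
  | cand :: rest, answers =>
      cand.foldl (fun acc v => if v ∈ answers then acc else acc ++ aDfs rest (answers ++ [v])) []

def solution (user_id : List String) (banned_id : List String) : Int :=
  let res := banned_id.foldl (fun res b =>
    res ++ [user_id.foldl (fun temp u =>
      if PySem.Str.len u = PySem.Str.len b ∧ aMatchLoop u.toList b.toList then temp ++ [u]
      else temp) []]) []
  let ans := aDfs res []
  (PySem.Set.len (PySem.Set.ofList
    (ans.map (fun x => PySem.Str.join "" (PySem.List.sorted x (fun s => s) false)))))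

-- ===== PORT B =====
def bMatch (u b : String) : Bool :=
  (PySem.Str.len u == PySem.Str.len b) &&
    (List.zip u.toList b.toList).all (fun ucbc => ucbc.2 == '*' || ucbc.1 == ucbc.2)

def solution_alt (user_id : List String) (banned_id : List String) : Int :=
  let res := banned_id.map (fun b => user_id.filter (fun u => bMatch u b))
  let part := res.foldl (fun part cand =>
    part.flatMap (fun p => (cand.filter (fun v => decide (¬ v ∈ p))).map (fun v => p ++ [v]))) [[]]
  (PySem.Set.len (PySem.Set.ofList
    (part.map (fun p => PySem.Str.join "" (PySem.List.sorted p (fun s => s) false)))))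

-- ===== PRECONDITION & SPEC =====
def Spec_solution (user_id : List String) (banned_id : List String) (out : Int) : Prop := out = solution_alt user_id banned_id
instance (user_id : List String) (banned_id : List String) (out : Int) : Decidable (Spec_solution user_id banned_id out) := by unfold Spec_solution; infer_instance

-- ===== CLAIM (what is proved, stated in full; the proofs are below) =====
def Claim_equal_solution : Prop := ∀ (user_id : List String) (banned_id : List String), Dom_solution user_id banned_id → Spec_solution user_id banned_id (solution user_id banned_id)

-- ===== LEMMAS AND PROOFS =====

-- A's index loop with break equals B's all-over-zip test (both stop at the shorter list)
theorem matchLoop_eq_all (u b : List Char) :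
    aMatchLoop u b = (List.zip u b).all (fun p => p.2 == '*' || p.1 == p.2) := by
  induction u generalizing b with
  | nil => simp [aMatchLoop]
  | cons c u' ih =>
    cases b with
    | nil => simp [aMatchLoop]
    | cons d b' =>
      by_cases hc : c = d
      · subst hc
        simp [aMatchLoop, ih]
      · by_cases hd : d = '*'
        · subst hd
          simp [aMatchLoop, hc, ih]
        · simp [aMatchLoop, hc, hd]

-- the two candidate tests agree
theorem match_agree (u b : String) :
    (decide (PySem.Str.len u = PySem.Str.len b ∧ aMatchLoop u.toList b.toList = true)) = bMatch u b := by
  unfold bMatch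
  rw [matchLoop_eq_all]
  simp only [Bool.decide_and, Bool.decide_eq_true]
  rw [Bool.beq_eq_decide_eq]

-- one DFS level as filter/map/flatMap
theorem dfs_cons (cand : List String) (rest : List (List String)) (p : List String)
    (init : List (List String)) :
    cand.foldl (fun acc v => if v ∈ p then acc else acc ++ aDfs rest (p ++ [v])) init
      = init ++ ((cand.filter (fun v => decide (¬ v ∈ p))).map (fun v => p ++ [v])).flatMap
          (fun q => aDfs rest q) := by
  induction cand generalizing init with
  | nil => simp
  | cons v cand' ih =>
    by_cases hv : v ∈ p
    · simp [List.foldl_cons, hv, ih]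
    · simp [List.foldl_cons, hv, ih]

-- the whole recursive DFS equals B's level-by-level fold
theorem dfs_eq_fold (res : List (List String)) (parts : List (List String)) :
    res.foldl (fun part cand =>
        part.flatMap (fun p => (cand.filter (fun v => decide (¬ v ∈ p))).map (fun v => p ++ [v]))) parts
      = parts.flatMap (fun p => aDfs res p) := by
  induction res generalizing parts with
  | nil => simp [aDfs]
  | cons cand rest ih =>
    rw [List.foldl_cons, ih]
    rw [List.flatMap_assoc]
    congr 1
    funext p
    show _ = aDfs (cand :: rest) p
    rw [aDfs]
    rw [dfs_cons]
    simp

-- ===== VERDICT (by name: the statement is the Claim_ definition above) =====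
theorem solution_spec : Claim_equal_solution := by
  intro user banned _
  unfold Spec_solution solution solution_alt
  have h1 : ∀ b : String,
      user.foldl (fun temp u =>
        if PySem.Str.len u = PySem.Str.len b ∧ aMatchLoop u.toList b.toList then temp ++ [u]
        else temp) []
      = user.filter (fun u => bMatch u b) := by
    intro b
    rw [PySem.List.foldl_append_ite_eq_filter]
    simp only [match_agree, List.nil_append]
  rw [PySem.List.foldl_append_singleton_eq_map]
  simp only [List.nil_append, h1]
  rw [dfs_eq_fold]
  simp
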